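-- pv_equiv track=rewrite | github.com/spaceonion1001/PrecisionMatrixAdj | src/aad_metric_model.py | convert_to_triples
-- ===== SOURCE A (Python) =====
-- def convert_to_triples(data, labels):
--     #nn = NearestNeighbors(n_neighbors=)
--     triplet_idxs = []
--     for i in range(len(labels)-2):
--         for j in range(i+1, len(labels)-1):
--             for k in range(i+2, len(labels)):
--                 curr_i = labels[i]
--                 curr_j = labels[j]
--                 curr_k = labels[k]
--                 if curr_i == curr_j and curr_i != curr_k:
--                     triplet_idxs.append((i, j, k))
--
--     return triplet_idxs
-- ===== SOURCE B (Python) =====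
-- def convert_to_triples(data, labels):
--     n = len(labels)
--     pos = {}
--     for idx in range(n):
--         pos.setdefault(labels[idx], []).append(idx)
--     out = []
--     for i in range(n - 2):
--         l = labels[i]
--         js = [j for j in pos[l] if i < j < n - 1]
--         ks = [k for k in range(i + 2, n) if labels[k] != l]
--         out.extend((i, j, k) for j in js for k in ks)
--     return out
-- ===== Notes on version B (the rewrite author's own statement) =====
-- stated objective: faster
-- what changed: B replaces A's triple nested loop with a per-triple label test by a one-pass dict grouping indices by label, then for each anchor i takes the same-label j's from the group and the different-label k's once and emits their cartesian product.
import Mathlib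
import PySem

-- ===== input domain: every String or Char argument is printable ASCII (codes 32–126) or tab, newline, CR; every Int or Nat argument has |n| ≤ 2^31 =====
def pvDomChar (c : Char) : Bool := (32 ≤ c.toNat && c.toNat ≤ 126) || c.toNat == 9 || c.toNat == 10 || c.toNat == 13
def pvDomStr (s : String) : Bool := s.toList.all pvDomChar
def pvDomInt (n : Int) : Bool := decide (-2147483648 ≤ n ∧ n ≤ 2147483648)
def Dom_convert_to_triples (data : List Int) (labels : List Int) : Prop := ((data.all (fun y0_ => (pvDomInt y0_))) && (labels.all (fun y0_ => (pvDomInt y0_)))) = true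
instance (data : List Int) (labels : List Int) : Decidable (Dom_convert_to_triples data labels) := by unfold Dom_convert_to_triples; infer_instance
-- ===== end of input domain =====

-- B groups indices by label in one pass, then per anchor i emits the cartesian product of
-- its same-label j's and different-label k's, instead of A's triple loop testing each (i,j,k).

-- ===== PORT A =====
def convert_to_triples (data : List Int) (labels : List Int) : List (List Int) :=
  let n : Int := labels.length
  (PySem.List.pyRange 0 (n - 2) 1).foldl (fun acc i =>
    (PySem.List.pyRange (i + 1) (n - 1) 1).foldl (fun acc2 j =>
      (PySem.List.pyRange (i + 2) n 1).foldl (fun acc3 k =>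
        let curr_i := PySem.List.pyGetD labels i 0
        let curr_j := PySem.List.pyGetD labels j 0
        let curr_k := PySem.List.pyGetD labels k 0
        if curr_i == curr_j && curr_i != curr_k then acc3 ++ [[i, j, k]] else acc3)
        acc2) acc) []

-- ===== PORT B =====
-- pos.setdefault(labels[idx], []).append(idx) for idx in range(n)
def pvGroupByLabel (labels : List Int) : PySem.Dict Int (List Int) :=
  (PySem.List.pyRange 0 (labels.length : Int) 1).foldl
    (fun d idx =>
      let l := PySem.List.pyGetD labels idx 0
      d.insert l (d.getD l [] ++ [idx]))
    PySem.Dict.empty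

def convert_to_triples_alt (data : List Int) (labels : List Int) : List (List Int) :=
  let n : Int := labels.length
  let pos := pvGroupByLabel labels
  (PySem.List.pyRange 0 (n - 2) 1).foldl (fun out i =>
    let l := PySem.List.pyGetD labels i 0
    let js := (pos.getD l []).filter (fun j => decide (i < j) && decide (j < n - 1))
    let ks := (PySem.List.pyRange (i + 2) n 1).filter (fun k => PySem.List.pyGetD labels k 0 != l)
    out ++ js.flatMap (fun j => ks.map (fun k => [i, j, k]))) []

-- ===== PRECONDITION & SPEC =====
def Spec_convert_to_triples (data : List Int) (labels : List Int) (out : List (List Int)) : Prop := out = convert_to_triples_alt data labels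
instance (data : List Int) (labels : List Int) (out : List (List Int)) : Decidable (Spec_convert_to_triples data labels out) := by unfold Spec_convert_to_triples; infer_instance

-- ===== CLAIM (what is proved, stated in full; the proofs are below) =====
def Claim_equal_convert_to_triples : Prop := ∀ (data : List Int) (labels : List Int), Dom_convert_to_triples data labels → Spec_convert_to_triples data labels (convert_to_triples data labels)

-- ===== LEMMAS AND PROOFS =====

-- grouping invariant for the setdefault/append fold, generalized over the start dict
theorem pvGroup_fold (lab : Int → Int) (is : List Int) (d : PySem.Dict Int (List Int)) (l : Int) :
    (is.foldl (fun d idx => d.insert (lab idx) (d.getD (lab idx) [] ++ [idx])) d).getD l [] =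
      d.getD l [] ++ is.filter (fun idx => lab idx == l) := by
  induction is generalizing d with
  | nil => simp
  | cons x rest ih =>
    simp only [List.foldl_cons, List.filter_cons, ih]
    rw [PySem.Dict.getD_insert]
    by_cases h : lab x = l
    · simp [h]
    · simp [h, Ne.symm h, beq_iff_eq]

-- B's dict maps l to exactly the label-l indices of range(0, n), in increasing order
theorem pvGroup_getD (labels : List Int) (l : Int) :
    (pvGroupByLabel labels).getD l [] =
      (PySem.List.pyRange 0 (labels.length : Int) 1).filter
        (fun idx => PySem.List.pyGetD labels idx 0 == l) := by
  unfold pvGroupByLabel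
  rw [pvGroup_fold (fun idx => PySem.List.pyGetD labels idx 0)]
  simp [PySem.Dict.getD, PySem.Dict.get?, PySem.Dict.empty]

theorem pvFlatMap_filter {α β : Type} (xs : List α) (p : α → Bool) (g : α → List β) :
    xs.flatMap (fun x => if p x then g x else []) = (xs.filter p).flatMap g := by
  induction xs with
  | nil => rfl
  | cons x rest ih =>
    simp only [List.flatMap_cons, List.filter_cons, ih]
    by_cases h : p x <;> simp [h]

-- restricting the label-filtered full range by i < j < n-1 is the label filter of range(i+1, n-1)
theorem pvBounds_filter (n i : Int) (p : Int → Bool)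
    (h0 : 0 ≤ i) (h1 : i < n - 2) :
    ((PySem.List.pyRange 0 n 1).filter p).filter
        (fun j => decide (i < j) && decide (j < n - 1)) =
      (PySem.List.pyRange (i + 1) (n - 1) 1).filter p := by
  rw [List.filter_filter]
  rw [PySem.List.pyRange_one_append 0 (i+1) n (by omega) (by omega),
      PySem.List.pyRange_one_append (i+1) (n-1) n (by omega) (by omega)]
  rw [List.filter_append, List.filter_append]
  have hL : (PySem.List.pyRange 0 (i+1) 1).filter
      (fun a => (decide (i < a) && decide (a < n - 1)) && p a) = [] := by
    rw [List.filter_eq_nil_iff]; intro a ha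
    have := (PySem.List.mem_pyRange_one).1 ha
    simp only [Bool.and_eq_true, decide_eq_true_eq]; omega
  have hR : (PySem.List.pyRange (n-1) n 1).filter
      (fun a => (decide (i < a) && decide (a < n - 1)) && p a) = [] := by
    rw [List.filter_eq_nil_iff]; intro a ha
    have := (PySem.List.mem_pyRange_one).1 ha
    simp only [Bool.and_eq_true, decide_eq_true_eq]; omega
  have hM : (PySem.List.pyRange (i+1) (n-1) 1).filter
      (fun a => (decide (i < a) && decide (a < n - 1)) && p a) =
      (PySem.List.pyRange (i+1) (n-1) 1).filter p := by
    apply List.filter_congr; intro a ha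
    have := (PySem.List.mem_pyRange_one).1 ha
    have h2 : i < a := by omega
    have h3 : a < n - 1 := by omega
    simp [h2, h3]
  rw [hL, hR, hM]; simp

theorem pvFilter_and_const {α : Type} (xs : List α) (b : Bool) (p : α → Bool) :
    xs.filter (fun x => b && p x) = if b then xs.filter p else [] := by
  cases b <;> simp

-- ===== VERDICT (by name: the statement is the Claim_ definition above) =====
theorem convert_to_triples_spec : Claim_equal_convert_to_triples := by
  intro data labels _
  unfold Spec_convert_to_triples convert_to_triples convert_to_triples_alt
  simp only [PySem.List.foldl_append_if, PySem.List.foldl_append_eq_flatMap,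
             List.nil_append]
  apply List.flatMap_congr
  intro i hi
  have hi' := (PySem.List.mem_pyRange_one).1 hi
  rw [pvGroup_getD, pvBounds_filter _ i _ (by omega) (by omega)]
  -- LHS: factor the constant conjunct out of the inner k-filter and push the j-filter out
  have hstep : ∀ j : Int,
      ((PySem.List.pyRange (i + 2) (labels.length : Int) 1).filter
          (fun k => PySem.List.pyGetD labels i 0 == PySem.List.pyGetD labels j 0 &&
            PySem.List.pyGetD labels i 0 != PySem.List.pyGetD labels k 0)).map
        (fun k => [i, j, k]) =
      if PySem.List.pyGetD labels i 0 == PySem.List.pyGetD labels j 0 then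
        ((PySem.List.pyRange (i + 2) (labels.length : Int) 1).filter
            (fun k => PySem.List.pyGetD labels k 0 != PySem.List.pyGetD labels i 0)).map
          (fun k => [i, j, k])
      else [] := by
    intro j
    rw [pvFilter_and_const]
    by_cases h : PySem.List.pyGetD labels i 0 == PySem.List.pyGetD labels j 0
    · simp only [h, if_true]
      congr 1
      apply List.filter_congr
      intro k _
      exact bne_comm ..
    · simp [h]
  calc (PySem.List.pyRange (i + 1) ((labels.length : Int) - 1) 1).flatMap
        (fun j => ((PySem.List.pyRange (i + 2) (labels.length : Int) 1).filter
            (fun k => PySem.List.pyGetD labels i 0 == PySem.List.pyGetD labels j 0 &&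
              PySem.List.pyGetD labels i 0 != PySem.List.pyGetD labels k 0)).map
          (fun k => [i, j, k]))
      = (PySem.List.pyRange (i + 1) ((labels.length : Int) - 1) 1).flatMap
        (fun j => if PySem.List.pyGetD labels i 0 == PySem.List.pyGetD labels j 0 then
            ((PySem.List.pyRange (i + 2) (labels.length : Int) 1).filter
                (fun k => PySem.List.pyGetD labels k 0 != PySem.List.pyGetD labels i 0)).map
              (fun k => [i, j, k])
          else []) := List.flatMap_congr (fun j _ => hstep j)
    _ = ((PySem.List.pyRange (i + 1) ((labels.length : Int) - 1) 1).filter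
          (fun j => PySem.List.pyGetD labels i 0 == PySem.List.pyGetD labels j 0)).flatMap
        (fun j => ((PySem.List.pyRange (i + 2) (labels.length : Int) 1).filter
            (fun k => PySem.List.pyGetD labels k 0 != PySem.List.pyGetD labels i 0)).map
          (fun k => [i, j, k])) := pvFlatMap_filter ..
    _ = ((PySem.List.pyRange (i + 1) ((labels.length : Int) - 1) 1).filter
          (fun j => PySem.List.pyGetD labels j 0 == PySem.List.pyGetD labels i 0)).flatMap
        (fun j => ((PySem.List.pyRange (i + 2) (labels.length : Int) 1).filter
            (fun k => PySem.List.pyGetD labels k 0 != PySem.List.pyGetD labels i 0)).map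
          (fun k => [i, j, k])) := by
        rw [List.filter_congr (fun a _ => Bool.beq_comm ..)]
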